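-- pv_equiv track=rewrite | github.com/SebastianDuda0106/prg-basics | 07-Arrays/programs/MyText.py | textalphab
-- ===== SOURCE A (Python) =====
-- def numofwords(text):
--     count=0
--     for i in text:
--         if i ==" ":
--             count+=1
--     return count
--
-- def textalphab(text):
--     word=["" for x in range(0,numofwords(text)+1)]
--     count=0
--     for i in text:
--         word[count]+=i
--         if i ==" ":
--             count+=1
--     word.sort()
--     return word
-- ===== SOURCE B (Python) =====
-- def textalphab(text):
--     parts = text.split(" ")
--     words = [p + " " for p in parts[:-1]] + [parts[-1]]
--     words.sort()
--     return words
-- ===== Notes on version B (the rewrite author's own statement) =====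
-- stated objective: faster
-- what changed: A counts spaces in a first pass, preallocates a list of empty strings and fills it character by character (string-concatenating into the current slot, which is quadratic in word length) with an index that advances at each space, then sorts; B does one library split on the single-space separator, re-attaches the trailing space A keeps on every word but the last, and sorts.
import Mathlib
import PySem

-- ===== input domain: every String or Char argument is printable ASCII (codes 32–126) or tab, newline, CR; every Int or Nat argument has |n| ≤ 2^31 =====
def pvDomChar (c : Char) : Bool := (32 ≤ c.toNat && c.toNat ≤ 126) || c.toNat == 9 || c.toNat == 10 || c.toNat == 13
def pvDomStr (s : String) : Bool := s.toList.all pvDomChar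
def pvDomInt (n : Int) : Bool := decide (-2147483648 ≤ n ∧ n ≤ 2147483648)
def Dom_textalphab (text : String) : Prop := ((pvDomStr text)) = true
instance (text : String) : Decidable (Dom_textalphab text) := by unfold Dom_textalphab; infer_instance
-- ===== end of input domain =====

-- B replaces A's space-counting preallocation and per-character index loop by a library split on " "
-- (re-adding the trailing space A keeps on every word but the last) followed by a sort: measurably faster (A string-concatenates per character).

-- ===== PORT A =====
def numofwords (text : String) : Int :=
  text.toList.foldl (fun count i => if i = ' ' then count + 1 else count) 0

def textalphab (text : String) : List String :=
  let word : List String := (PySem.List.pyRange 0 (numofwords text + 1) 1).map (fun _ => "")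
  let r := text.toList.foldl
    (fun (st : List String × Nat) i =>
      let w := st.1.modify st.2 (fun s => s.push i)   -- word[count] += i (count is always in range)
      if i = ' ' then (w, st.2 + 1) else (w, st.2)) (word, 0)
  PySem.List.sorted r.1 (fun w => w)

-- ===== PORT B =====
def textalphab_alt (text : String) : List String :=
  let parts := (PySem.Str.split? text " ").getD []   -- sep " " is non-empty, so split? is always `some`
  let words := (PySem.List.slice parts none (some (-1))).map (fun p => p ++ " ")
      ++ [PySem.List.pyGetD parts (-1) ""]           -- parts[-1]; parts is never empty
  PySem.List.sorted words (fun w => w)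

-- ===== PRECONDITION & SPEC =====
def Spec_textalphab (text : String) (out : List String) : Prop := out = textalphab_alt text
instance (text : String) (out : List String) : Decidable (Spec_textalphab text out) := by unfold Spec_textalphab; infer_instance

-- ===== CLAIM (what is proved, stated in full; the proofs are below) =====
def Claim_equal_textalphab : Prop := ∀ (text : String), Dom_textalphab text → Spec_textalphab text (textalphab text)

-- ===== LEMMAS AND PROOFS =====

-- (first segment, later segments) of splitting a char list on ' '
def segsP : List Char → List Char × List (List Char)
  | [] => ([], [])
  | c :: r =>
    let p := segsP r
    if c = ' ' then ([], p.1 :: p.2) else (c :: p.1, p.2)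

-- the word list A's accumulation loop produces, starting from a current word `cur`
def wordsOf (cur : String) : List Char → List String
  | [] => [cur]
  | c :: r => if c = ' ' then (cur.push ' ') :: wordsOf "" r else wordsOf (cur.push c) r

-- append " " to every element but the last
def addTrail : List String → List String
  | [] => []
  | [x] => [x]
  | x :: y :: ys => (x ++ " ") :: addTrail (y :: ys)

theorem modify_at_append (pre : List String) (x : String) (t : List String) (f : String → String) :
    (pre ++ x :: t).modify pre.length f = pre ++ f x :: t := by
  induction pre with
  | nil => simp [List.modify]
  | cons a l ih => simpa [List.modify] using ih

-- invariant of A's accumulation loop: the words to the left of `count` are finished,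
-- the slot at `count` holds `cur`, and the slots to the right are still empty
theorem loopA (cs : List Char) (pre : List String) (cur : String) :
    cs.foldl
      (fun (st : List String × Nat) i =>
        let w := st.1.modify st.2 (fun s => s.push i)
        if i = ' ' then (w, st.2 + 1) else (w, st.2))
      (pre ++ cur :: List.replicate (cs.countP (fun c => c == ' ')) "", pre.length)
    = (pre ++ wordsOf cur cs, pre.length + cs.countP (fun c => c == ' ')) := by
  induction cs generalizing pre cur with
  | nil => simp [wordsOf]
  | cons c r ih =>
    rw [List.foldl_cons]
    by_cases h : c = ' '
    · subst h
      have hc : (' ' :: r).countP (fun c => c == ' ') = r.countP (fun c => c == ' ') + 1 := by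
        simp
      rw [hc, List.replicate_succ]
      dsimp only
      rw [modify_at_append, if_pos rfl]
      rw [List.append_cons pre (cur.push ' ')]
      have hl : pre.length + 1 = (pre ++ [cur.push ' ']).length := by simp
      rw [hl, ih (pre ++ [cur.push ' ']) ""]
      simp [wordsOf]
      omega
    · have hc : (c :: r).countP (fun c => c == ' ') = r.countP (fun c => c == ' ') := by
        simp [h]
      rw [hc]
      dsimp only
      rw [modify_at_append, if_neg h, ih pre (cur.push c)]
      simp [wordsOf, h]

theorem go_spec (fuel : Nat) (l cur : List Char) (acc : List (List Char)) (h : l.length < fuel) :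
    PySem.Chars.splitOn.go [' '] fuel l cur acc
      = acc.reverse ++ (cur.reverse ++ (segsP l).1) :: (segsP l).2 := by
  induction fuel generalizing l cur acc with
  | zero => omega
  | succ fuel ih =>
    cases l with
    | nil => simp [PySem.Chars.splitOn.go, segsP]
    | cons c rest =>
      rw [PySem.Chars.splitOn.go]
      by_cases hc : c = ' '
      · subst hc
        have hp : List.isPrefixOf [' '] (' ' :: rest) = true := by simp [List.isPrefixOf]
        rw [if_pos hp]
        simp only [List.length_cons] at h
        rw [ih _ _ _ (by simpa using Nat.lt_of_succ_lt_succ h)]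
        simp [segsP]
      · have hp : List.isPrefixOf [' '] (c :: rest) = false := by
          simp [List.isPrefixOf]; exact fun hh => (hc hh.symm).elim
        rw [if_neg (by simp [hp])]
        simp only [List.length_cons] at h
        rw [ih _ _ _ (Nat.lt_of_succ_lt_succ h)]
        simp [segsP, hc]

theorem splitOn_space (cs : List Char) :
    PySem.Chars.splitOn cs [' '] = (segsP cs).1 :: (segsP cs).2 := by
  rw [PySem.Chars.splitOn, go_spec _ _ _ _ (Nat.lt_succ_self _)]
  simp

-- A's accumulated words are exactly the split segments with " " re-attached to all but the last
theorem wordsOf_segsP (cs : List Char) (pref : List Char) :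
    wordsOf (String.ofList pref) cs
      = addTrail (String.ofList (pref ++ (segsP cs).1) :: (segsP cs).2.map String.ofList) := by
  induction cs generalizing pref with
  | nil => simp [wordsOf, segsP, addTrail]
  | cons c r ih =>
    by_cases h : c = ' '
    · subst h
      have hpush : (String.ofList pref).push ' ' = String.ofList pref ++ " " := by
        apply String.toList_inj.mp; simp
      rw [show wordsOf (String.ofList pref) (' ' :: r)
            = ((String.ofList pref).push ' ') :: wordsOf "" r by simp [wordsOf]]
      rw [show ("" : String) = String.ofList [] from rfl, ih []]
      simp only [segsP]
      simp [addTrail, hpush]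
    · have hpush : (String.ofList pref).push c = String.ofList (pref ++ [c]) := by
        apply String.toList_inj.mp; simp
      rw [show wordsOf (String.ofList pref) (c :: r)
            = wordsOf ((String.ofList pref).push c) r by simp [wordsOf, h]]
      rw [hpush, ih (pref ++ [c])]
      simp [segsP, h]

theorem addTrail_shape (q : String) (qs : List String) :
    ((q :: qs).dropLast).map (fun p => p ++ " ") ++ [((q :: qs).getLast?).getD ""]
      = addTrail (q :: qs) := by
  induction qs generalizing q with
  | nil => simp [addTrail]
  | cons y ys ih => simpa [addTrail] using ih y

theorem pyGetD_neg_one {α : Type} (xs : List α) (d : α) :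
    PySem.List.pyGetD xs (-1) d = xs.getLast?.getD d := by
  cases xs with
  | nil => simp [PySem.List.pyGetD, PySem.List.pyGet?, PySem.List.pyIdx?]
  | cons q qs =>
    simp [PySem.List.pyGetD, PySem.List.pyGet?, PySem.List.pyIdx?, List.getLast?_eq_getElem?]

theorem slice_neg_one {α : Type} (xs : List α) :
    PySem.List.slice xs none (some (-1)) = xs.dropLast := by
  simp [PySem.List.slice, List.dropLast_eq_take]

theorem range_map_const (k : Nat) :
    (PySem.List.pyRange 0 (k : Int) 1).map (fun _ => ("" : String)) = List.replicate k "" := by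
  induction k with
  | zero => decide
  | succ n ih =>
    have h1 : ((n + 1 : Nat) : Int) = (n : Int) + 1 := by push_cast; ring
    rw [h1, PySem.List.pyRange_one_succ_right (by positivity), List.map_append, ih]
    simp [List.replicate_succ']

theorem numofwords_eq (text : String) :
    numofwords text = (text.toList.countP (fun c => c == ' ') : Int) := by
  unfold numofwords
  have hf : (fun (count : Int) i => if i = ' ' then count + 1 else count)
      = (fun (count : Int) i => if ((fun c => c == ' ') i) = true then count + 1 else count) := by
    funext a b; by_cases h : b = ' ' <;> simp [h]
  rw [hf, PySem.List.foldl_count_if]; simp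

theorem split_parts (text : String) :
    (PySem.Str.split? text " ").getD []
      = String.ofList (segsP text.toList).1 :: (segsP text.toList).2.map String.ofList := by
  simp [PySem.Str.split?, PySem.Chars.split?, show String.toList " " = [' '] from rfl,
    splitOn_space]

-- ===== VERDICT (by name: the statement is the Claim_ definition above) =====
theorem textalphab_spec : Claim_equal_textalphab := by
  intro text _
  unfold Spec_textalphab
  simp only [textalphab, textalphab_alt]
  -- A side: the preallocated list is ("" :: n empties) and the loop fills it with the words
  have h1 : numofwords text + 1 = ((text.toList.countP (fun c => c == ' ') + 1 : Nat) : Int) := by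
    rw [numofwords_eq]; push_cast; ring
  rw [h1, range_map_const, List.replicate_succ]
  have hloop := loopA text.toList [] ""
  simp only [List.nil_append, List.length_nil] at hloop
  rw [hloop]
  -- B side: split, drop-last slice, last element
  rw [split_parts, slice_neg_one, pyGetD_neg_one, addTrail_shape]
  rw [show ("" : String) = String.ofList [] from rfl, wordsOf_segsP text.toList []]
  simp
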